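-- pv_equiv track=rewrite | github.com/ZhengyangXu/Algorithm-Daily-Practice | 题源分类/剑指offer/python/面试题4：替换空格.py | replaceSpace
-- ===== SOURCE A (Python) =====
-- def replaceSpace(str):
--
--     if not str:
--         return ""
--
--     count = 0
--     for i in range(len(str)):
--         if str[i] == " ":
--             count += 1
--
--     ans = ['']*(len(str)+2*count)
--
--     p1,p2 = len(str)-1,len(ans)-1
--
--     while p1 >= 0 and p2 >= 0:
--         if str[p1] == " ":
--
--             for i in (["0","2","%"]):
--                 ans[p2] = i
--                 p2 -= 1
--             p1 -= 1
--         else: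
--             ans[p2] = str[p1]
--             p2 -= 1
--             p1 -= 1
--
--     return "".join(ans)
-- ===== SOURCE B (Python) =====
-- def replaceSpace(str):
--     if not str:
--         return ""
--     return "".join("%20" if c == " " else c for c in str)
-- ===== Notes on version B (the rewrite author's own statement) =====
-- stated objective: simpler
-- what changed: Replaced the space-count pass plus preallocated array with backward two-pointer fill by a single forward pass that joins the replacement or the character itself.
import Mathlib
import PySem

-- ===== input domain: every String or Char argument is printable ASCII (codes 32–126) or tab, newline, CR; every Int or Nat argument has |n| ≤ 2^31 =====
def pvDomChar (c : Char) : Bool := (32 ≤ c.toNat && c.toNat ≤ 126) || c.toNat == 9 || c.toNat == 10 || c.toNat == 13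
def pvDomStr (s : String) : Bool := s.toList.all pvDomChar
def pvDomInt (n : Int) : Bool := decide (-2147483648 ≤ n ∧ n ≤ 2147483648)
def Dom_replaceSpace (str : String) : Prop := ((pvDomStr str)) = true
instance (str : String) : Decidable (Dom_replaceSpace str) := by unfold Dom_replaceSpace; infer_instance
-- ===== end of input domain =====

-- B replaces A's count pass + preallocated array + backward two-pointer fill with one
-- forward pass joining "%20" or the character itself (objective: simpler).


-- ===== PORT A =====
-- the backward two-pointer fill: 'while p1 >= 0 and p2 >= 0: …'
def fillLoopA (cs : List Char) (ans : List String) (p1 p2 : Int) : List String :=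
  if h : p1 ≥ 0 ∧ p2 ≥ 0 then
    if PySem.List.pyGetD cs p1 ' ' == ' ' then
      -- for i in ["0","2","%"]: ans[p2] = i; p2 -= 1   (three writes, in order)
      fillLoopA cs
        (PySem.List.pySetD (PySem.List.pySetD (PySem.List.pySetD ans p2 "0") (p2 - 1) "2") (p2 - 2) "%")
        (p1 - 1) (p2 - 3)
    else
      fillLoopA cs (PySem.List.pySetD ans p2 (String.mk [PySem.List.pyGetD cs p1 ' '])) (p1 - 1) (p2 - 1)
  else ans
termination_by (p1 + 1).toNat
decreasing_by all_goals omega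

def replaceSpace (str : String) : String :=
  if str = "" then ""
  else
    let cs := str.toList
    let count : Int := (PySem.List.pyRange 0 (PySem.Str.len str) 1).foldl
      (fun count i => if PySem.List.pyGetD cs i ' ' == ' ' then count + 1 else count) 0
    let ans : List String := PySem.List.pyRepeat [""] (PySem.Str.len str + 2 * count)
    let p1 : Int := PySem.Str.len str - 1
    let p2 : Int := (ans.length : Int) - 1
    PySem.Str.join "" (fillLoopA cs ans p1 p2)

-- ===== PORT B =====
def replaceSpace_alt (str : String) : String :=
  if str = "" then ""
  else PySem.Str.join "" (str.toList.map (fun c => if c == ' ' then "%20" else String.mk [c]))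

-- ===== PRECONDITION & SPEC =====
def Spec_replaceSpace (str : String) (out : String) : Prop := out = replaceSpace_alt str
instance (str : String) (out : String) : Decidable (Spec_replaceSpace str out) := by unfold Spec_replaceSpace; infer_instance

-- ===== CLAIM (what is proved, stated in full; the proofs are below) =====
def Claim_equal_replaceSpace : Prop := ∀ (str : String), Dom_replaceSpace str → Spec_replaceSpace str (replaceSpace str)

-- ===== LEMMAS AND PROOFS =====

-- the slice of the answer array produced for one source character
def chunk (c : Char) : List String := if c == ' ' then ["%", "2", "0"] else [String.mk [c]]

theorem length_flatMap_chunk (cs : List Char) :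
    (cs.flatMap chunk).length = cs.length + 2 * (cs.countP (· == ' ')) := by
  induction cs with
  | nil => rfl
  | cons c t ih =>
    by_cases h : c = ' ' <;>
      simp [chunk, List.countP_cons, h, ih] <;> omega

theorem flatten_intersperse_nil {α : Type} (l : List (List α)) :
    (List.intersperse [] l).flatten = l.flatten := by
  induction l with
  | nil => rfl
  | cons x t ih => cases t <;> simp_all [List.intersperse]

-- the three writes of the space branch, landing in the still-blank middle of the array
theorem set3_helper (m : Nat) (tail : List String) :
    PySem.List.pySetD (PySem.List.pySetD (PySem.List.pySetD
        (List.replicate (m + 3) ("" : String) ++ tail) (((m + 3 : Nat) : Int) - 1) "0")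
        (((m + 3 : Nat) : Int) - 1 - 1) "2") (((m + 3 : Nat) : Int) - 1 - 2) "%"
      = List.replicate m "" ++ (["%", "2", "0"] ++ tail) := by
  have hrepl : List.replicate (m + 3) ("" : String) ++ tail
      = List.replicate m "" ++ (["", "", ""] ++ tail) := by
    rw [List.replicate_add, List.append_assoc]; rfl
  have e1 : (((m + 3 : Nat) : Int) - 1).toNat = m + 2 := by omega
  have e2 : (((m + 3 : Nat) : Int) - 1 - 1).toNat = m + 1 := by omega
  have e3 : (((m + 3 : Nat) : Int) - 1 - 2).toNat = m := by omega
  have s1 : PySem.List.pySetD (List.replicate m ("" : String) ++ (["", "", ""] ++ tail))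
      (((m + 3 : Nat) : Int) - 1) "0" = List.replicate m "" ++ (["", "", "0"] ++ tail) := by
    rw [PySem.List.pySetD_of_nonneg (i := ((m + 3 : Nat) : Int) - 1) _ _ (by omega), e1,
        List.set_append_right _ _ (by simp only [List.length_replicate]; omega)]
    simp
  have s2 : PySem.List.pySetD (List.replicate m ("" : String) ++ (["", "", "0"] ++ tail))
      (((m + 3 : Nat) : Int) - 1 - 1) "2" = List.replicate m "" ++ (["", "2", "0"] ++ tail) := by
    rw [PySem.List.pySetD_of_nonneg (i := ((m + 3 : Nat) : Int) - 1 - 1) _ _ (by omega), e2,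
        List.set_append_right _ _ (by simp only [List.length_replicate]; omega)]
    simp
  have s3 : PySem.List.pySetD (List.replicate m ("" : String) ++ (["", "2", "0"] ++ tail))
      (((m + 3 : Nat) : Int) - 1 - 2) "%" = List.replicate m "" ++ (["%", "2", "0"] ++ tail) := by
    rw [PySem.List.pySetD_of_nonneg (i := ((m + 3 : Nat) : Int) - 1 - 2) _ _ (by omega), e3,
        List.set_append_right _ _ (by simp only [List.length_replicate]; omega)]
    simp
  rw [hrepl, s1, s2, s3]

-- the single write of the non-space branch
theorem set1_helper (m : Nat) (tail : List String) (v : String) :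
    PySem.List.pySetD (List.replicate (m + 1) ("" : String) ++ tail) (((m + 1 : Nat) : Int) - 1) v
      = List.replicate m "" ++ ([v] ++ tail) := by
  have hrepl : List.replicate (m + 1) ("" : String) ++ tail
      = List.replicate m "" ++ ([""] ++ tail) := by
    rw [List.replicate_add, List.append_assoc]; rfl
  have e1 : (((m + 1 : Nat) : Int) - 1).toNat = m := by omega
  rw [hrepl, PySem.List.pySetD_of_nonneg (i := ((m + 1 : Nat) : Int) - 1) _ _ (by omega), e1,
      List.set_append_right _ _ (by simp only [List.length_replicate]; omega)]
  simp

theorem fill_spec (cs : List Char) (k : Nat) (tail : List String) (hk : k ≤ cs.length) :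
    fillLoopA cs (List.replicate ((cs.take k).flatMap chunk).length "" ++ tail)
        ((k : Int) - 1) ((((cs.take k).flatMap chunk).length : Int) - 1)
      = (cs.take k).flatMap chunk ++ tail := by
  induction k generalizing tail with
  | zero => simp [fillLoopA]
  | succ n ih =>
    have hn : n < cs.length := by omega
    have htake : cs.take (n + 1) = cs.take n ++ [cs[n]] := by
      rw [List.take_add_one]
      simp [List.getElem?_eq_getElem hn]
    set m := ((cs.take n).flatMap chunk).length with hm
    have hget : PySem.List.pyGetD cs (n : Int) ' ' = cs[n] := by
      rw [PySem.List.pyGetD_natCast]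
      exact List.getD_eq_getElem cs ' ' hn
    have hc1 : ((n + 1 : Nat) : Int) - 1 = (n : Int) := by push_cast; omega
    by_cases hsp : cs[n] = ' '
    · have hlen : ((cs.take (n + 1)).flatMap chunk).length = m + 3 := by
        rw [htake, List.flatMap_append, List.length_append, ← hm]
        simp [chunk, hsp]
      rw [hlen, fillLoopA, dif_pos (by push_cast; omega), hc1, hget,
          if_pos (by simp [hsp]), set3_helper m tail,
          show ((m + 3 : Nat) : Int) - 1 - 3 = (m : Int) - 1 from by push_cast; omega,
          show (n : Int) - 1 = ((n : Nat) : Int) - 1 from rfl,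
          ih (["%", "2", "0"] ++ tail) (by omega), htake, List.flatMap_append]
      simp [chunk, hsp]
    · have hlen : ((cs.take (n + 1)).flatMap chunk).length = m + 1 := by
        rw [htake, List.flatMap_append, List.length_append, ← hm]
        simp [chunk, hsp]
      rw [hlen, fillLoopA, dif_pos (by push_cast; omega), hc1, hget,
          if_neg (by simp [hsp]), set1_helper m tail,
          show ((m + 1 : Nat) : Int) - 1 - 1 = (m : Int) - 1 from by push_cast; omega,
          show (n : Int) - 1 = ((n : Nat) : Int) - 1 from rfl,
          ih ([String.mk [cs[n]]] ++ tail) (by omega), htake, List.flatMap_append]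
      simp [chunk, hsp]

theorem join_chunk_chars (cs : List Char) :
    (List.map String.toList (cs.flatMap chunk)).flatten
      = (List.map String.toList
          (cs.map (fun c => if c == ' ' then "%20" else String.mk [c]))).flatten := by
  induction cs with
  | nil => rfl
  | cons c t ih => by_cases h : c = ' ' <;> simp_all [chunk]

theorem join_chunk_eq (cs : List Char) :
    PySem.Str.join "" (cs.flatMap chunk)
      = PySem.Str.join "" (cs.map (fun c => if c == ' ' then "%20" else String.mk [c])) := by
  simp [PySem.Str.join, PySem.Chars.join, List.intercalate, flatten_intersperse_nil,
        join_chunk_chars cs]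

theorem count_fold_eq (cs : List Char) :
    (PySem.List.pyRange 0 (cs.length : Int) 1).foldl
        (fun count i => if PySem.List.pyGetD cs i ' ' == ' ' then count + 1 else count) 0
      = (cs.countP (· == ' ') : Int) := by
  rw [PySem.List.foldl_pyRange_zero_pyGetD' cs ' '
      (fun acc c => if c == ' ' then acc + 1 else acc) 0,
      PySem.List.foldl_if_add_one (fun c => c == ' ')]
  simp

-- ===== VERDICT (by name: the statement is the Claim_ definition above) =====
theorem replaceSpace_spec : Claim_equal_replaceSpace := by
  intro str _
  unfold Spec_replaceSpace
  by_cases h : str = ""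
  · simp [replaceSpace, replaceSpace_alt, h]
  · simp only [replaceSpace, replaceSpace_alt, if_neg h, PySem.Str.len_eq]
    rw [count_fold_eq, PySem.List.pyRepeat_singleton]
    have hN : (((str.toList.length : Nat) : Int)
        + 2 * ((str.toList.countP (· == ' ') : Nat) : Int)).toNat
        = (str.toList.flatMap chunk).length := by
      rw [length_flatMap_chunk]; omega
    rw [hN, List.length_replicate]
    have hfill := fill_spec str.toList str.toList.length [] le_rfl
    rw [List.take_length] at hfill
    simp only [List.append_nil] at hfill
    rw [hfill, join_chunk_eq]
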